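-- pv_equiv track=rewrite | github.com/HuskyCommunicator/qny | qny-python/app/services/validation_service.py | _get_allowed_extensions
-- ===== SOURCE A (Python) =====
-- from typing import Any, Dict, List, Optional, Union, Type
--
-- def _get_allowed_extensions(allowed_types: List[str]) -> List[str]:
--     """根据MIME类型获取允许的文件扩展名"""
--     mime_to_extension = {
--         'image/jpeg': ['jpg', 'jpeg'],
--         'image/png': ['png'],
--         'image/gif': ['gif'],
--         'image/webp': ['webp'],
--         'text/plain': ['txt'],
--         'application/json': ['json'],
--         'application/pdf': ['pdf']
--     }
--
--     extensions = []
--     for mime_type in allowed_types: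
--         if mime_type in mime_to_extension:
--             extensions.extend(mime_to_extension[mime_type])
--
--     return list(set(extensions))
-- ===== SOURCE B (Python) =====
-- def _get_allowed_extensions(allowed_types):
--     """根据MIME类型获取允许的文件扩展名"""
--     mime_to_extension = {
--         'image/jpeg': ['jpg', 'jpeg'],
--         'image/png': ['png'],
--         'image/gif': ['gif'],
--         'image/webp': ['webp'],
--         'text/plain': ['txt'],
--         'application/json': ['json'],
--         'application/pdf': ['pdf']
--     }
--
--     allowed = set(allowed_types)
--     result = set()
--     for mime_type, exts in mime_to_extension.items():
--         if mime_type in allowed: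
--             result.update(exts)
--     return list(result)
-- ===== Notes on version B (the rewrite author's own statement) =====
-- stated objective: alternative
-- what changed: B inverts the pass shape: it condenses the input to a membership set once and drives the loop over the fixed 7-entry MIME table, union-ing extension lists into a set, instead of scanning the input and extending a duplicate-carrying list per occurrence; the returned set of extensions is identical.
import Mathlib
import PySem

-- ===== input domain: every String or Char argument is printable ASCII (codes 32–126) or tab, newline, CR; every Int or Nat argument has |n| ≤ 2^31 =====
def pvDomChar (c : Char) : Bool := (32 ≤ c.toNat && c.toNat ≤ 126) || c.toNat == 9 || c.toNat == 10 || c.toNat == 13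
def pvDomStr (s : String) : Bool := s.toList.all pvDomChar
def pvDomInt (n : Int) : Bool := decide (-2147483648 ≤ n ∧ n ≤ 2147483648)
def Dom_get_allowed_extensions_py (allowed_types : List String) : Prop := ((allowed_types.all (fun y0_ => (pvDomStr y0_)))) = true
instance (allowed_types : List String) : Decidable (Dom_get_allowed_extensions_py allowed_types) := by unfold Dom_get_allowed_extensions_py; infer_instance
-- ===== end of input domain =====

-- B drives the loop over the fixed MIME table with the input condensed to a membership set,
-- instead of scanning the input and extending a list per occurrence (objective: alternative).
-- Both Pythons return list(set(...)), whose hash iteration order is not modelled; the output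
-- is compared as a finite set, so BOTH ports return the distinct extensions in sorted order
-- (the same canonical order on both sides; exact as a set).

-- ===== PORT A =====
-- the literal dict of A (and of B; the same table text appears in both sources)
def pvMimeTable : PySem.Dict String (List String) :=
  PySem.Dict.ofList [("image/jpeg", ["jpg", "jpeg"]), ("image/png", ["png"]),
    ("image/gif", ["gif"]), ("image/webp", ["webp"]), ("text/plain", ["txt"]),
    ("application/json", ["json"]), ("application/pdf", ["pdf"])]

def get_allowed_extensions_py (allowed_types : List String) : List String :=
  let extensions : List String :=
    allowed_types.foldl
      (fun acc mime_type =>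
        if pvMimeTable.contains mime_type then acc ++ pvMimeTable.getD mime_type [] else acc)
      []
  PySem.List.sorted (PySem.Set.ofList extensions) (fun x => x) false

-- ===== PORT B =====
def get_allowed_extensions_py_alt (allowed_types : List String) : List String :=
  let allowed : PySem.Set String := PySem.Set.ofList allowed_types
  let result : PySem.Set String :=
    pvMimeTable.items.foldl
      (fun s p => if PySem.Set.contains allowed p.1 then PySem.Set.update s p.2 else s)
      PySem.Set.empty
  PySem.List.sorted result (fun x => x) false

-- ===== PRECONDITION & SPEC =====
def Spec_get_allowed_extensions_py (allowed_types : List String) (out : List String) : Prop := out = get_allowed_extensions_py_alt allowed_types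
instance (allowed_types : List String) (out : List String) : Decidable (Spec_get_allowed_extensions_py allowed_types out) := by unfold Spec_get_allowed_extensions_py; infer_instance

-- ===== CLAIM (what is proved, stated in full; the proofs are below) =====
def Claim_equal_get_allowed_extensions_py : Prop := ∀ (allowed_types : List String), Dom_get_allowed_extensions_py allowed_types → Spec_get_allowed_extensions_py allowed_types (get_allowed_extensions_py allowed_types)

-- ===== LEMMAS AND PROOFS =====

-- membership in A's accumulated extensions list
theorem pv_memA (allowed_types : List String) (x : String) :
    x ∈ allowed_types.foldl
      (fun acc mime_type =>
        if pvMimeTable.contains mime_type then acc ++ pvMimeTable.getD mime_type [] else acc)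
      [] ↔ ∃ m ∈ allowed_types, x ∈ pvMimeTable.getD m [] := by
  rw [PySem.List.foldl_congr_mem allowed_types _
      (fun acc mime_type => acc ++ pvMimeTable.getD mime_type []) []
      (by
        intro acc m _
        by_cases h : pvMimeTable.contains m
        · simp [h]
        · simp [h, PySem.Dict.getD_of_not_contains pvMimeTable ([] : List String)
            (by simpa using h)]),
    PySem.List.foldl_append_eq_flatMap]
  simp [List.mem_flatMap]

-- membership in B's fold over the table
theorem pv_memB (allowed : PySem.Set String) (l : List (String × List String))
    (s : List String) (x : String) :
    x ∈ l.foldl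
      (fun s p => if PySem.Set.contains allowed p.1 then PySem.Set.update s p.2 else s) s ↔
      x ∈ s ∨ ∃ p ∈ l, p.1 ∈ allowed ∧ x ∈ p.2 := by
  induction l generalizing s with
  | nil => simp
  | cons hd tl ih =>
    simp only [List.foldl_cons]
    by_cases h : PySem.Set.contains allowed hd.1
    · rw [if_pos h, ih, PySem.Set.mem_update]
      have hm : hd.1 ∈ allowed := (PySem.Set.contains_iff allowed hd.1).mp h
      simp only [List.mem_cons]
      constructor
      · rintro ((hx | hx) | ⟨p, hp, hpa, hpx⟩)
        · exact Or.inl hx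
        · exact Or.inr ⟨hd, Or.inl rfl, hm, hx⟩
        · exact Or.inr ⟨p, Or.inr hp, hpa, hpx⟩
      · rintro (hx | ⟨p, hp | hp, hpa, hpx⟩)
        · exact Or.inl (Or.inl hx)
        · exact Or.inl (Or.inr (hp ▸ hpx))
        · exact Or.inr ⟨p, hp, hpa, hpx⟩
    · have h' : hd.1 ∉ allowed := fun hm => h ((PySem.Set.contains_iff allowed hd.1).mpr hm)
      rw [if_neg h, ih]
      simp only [List.mem_cons]
      constructor
      · rintro (hx | ⟨p, hp, hpa, hpx⟩)
        · exact Or.inl hx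
        · exact Or.inr ⟨p, Or.inr hp, hpa, hpx⟩
      · rintro (hx | ⟨p, hp | hp, hpa, hpx⟩)
        · exact Or.inl hx
        · exact absurd (hp ▸ hpa) h'
        · exact Or.inr ⟨p, hp, hpa, hpx⟩

-- B's fold preserves Nodup
theorem pv_nodupB (allowed : PySem.Set String) (l : List (String × List String))
    (s : List String) (hs : s.Nodup) :
    (l.foldl
      (fun s p => if PySem.Set.contains allowed p.1 then PySem.Set.update s p.2 else s)
      s).Nodup := by
  induction l generalizing s with
  | nil => simpa
  | cons hd tl ih =>
    by_cases h : PySem.Set.contains allowed hd.1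
    · simp only [List.foldl_cons, h, if_true]
      exact ih _ (PySem.Set.nodup_update s hd.2 hs)
    · simp only [List.foldl_cons, h]
      exact ih _ hs

-- lookup-with-default-[] membership, through the items list
theorem pv_getD_mem (m x : String) :
    x ∈ pvMimeTable.getD m [] ↔ ∃ v, (m, v) ∈ pvMimeTable.items ∧ x ∈ v := by
  have hnd : pvMimeTable.keys.Nodup := by decide
  rw [PySem.Dict.getD_eq_get?_getD]
  rcases hg : pvMimeTable.get? m with _ | v
  · simp only [Option.getD_none, List.not_mem_nil, false_iff]
    rintro ⟨v, hv, -⟩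
    have h2 := (PySem.Dict.get?_eq_some_iff_mem_items pvMimeTable m v hnd).mpr hv
    rw [hg] at h2
    simp at h2
  · simp only [Option.getD_some]
    constructor
    · intro hx
      exact ⟨v, (PySem.Dict.get?_eq_some_iff_mem_items pvMimeTable _ _ hnd).mp hg, hx⟩
    · rintro ⟨w, hw, hx⟩
      have h2 := (PySem.Dict.get?_eq_some_iff_mem_items pvMimeTable _ _ hnd).mpr hw
      rw [hg] at h2
      cases h2
      exact hx

theorem pv_main (allowed_types : List String) :
    get_allowed_extensions_py allowed_types = get_allowed_extensions_py_alt allowed_types := by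
  unfold get_allowed_extensions_py get_allowed_extensions_py_alt
  rw [PySem.List.sorted_id_eq_sorted_id_iff_perm]
  apply (List.perm_ext_iff_of_nodup (PySem.Set.nodup_ofList _)
    (pv_nodupB _ _ _ List.nodup_nil)).mpr
  intro x
  rw [PySem.Set.mem_ofList, pv_memA, pv_memB]
  simp only [List.not_mem_nil, false_or, PySem.Set.mem_ofList]
  constructor
  · rintro ⟨m, hm, hx⟩
    rcases (pv_getD_mem m x).mp hx with ⟨v, hv, hxv⟩
    exact ⟨(m, v), hv, hm, hxv⟩
  · rintro ⟨p, hp, hm, hx⟩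
    exact ⟨p.1, hm, (pv_getD_mem p.1 x).mpr ⟨p.2, hp, hx⟩⟩

-- ===== VERDICT (by name: the statement is the Claim_ definition above) =====
theorem get_allowed_extensions_py_spec : Claim_equal_get_allowed_extensions_py := by
  intro allowed_types _
  exact pv_main allowed_types
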